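-- pv_equiv track=rewrite | github.com/lovehhf/LeetCode | contest/第 23 场双周赛/1401. 圆和矩形是否有重叠.py | checkOverlap
-- ===== SOURCE A (Python) =====
-- def checkOverlap(radius: int, x_center: int, y_center: int, x1: int, y1: int, x2: int, y2: int) -> bool:
--     # 1. 圆心在矩形内
--     if (x1 <= x_center <= x2 and y1 <= y_center <= y2):
--         return True
--
--     # 2. 矩形的某个角在圆心内
--     for x in (x1, x2):
--         for y in (y1, y2):
--             if (x - x_center) * (x - x_center) + (y - y_center) * (y - y_center) <= radius * radius:
--                 return True
--
--     # 3. 圆与矩形的某一条线相交 (圆心到线的距离)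
--     if (x1 <= x_center <= x2 and (abs(y_center - y1) <= radius or abs(y_center - y2) <= radius)):
--         return True
--     if (y1 <= y_center <= y2 and (abs(x_center - x1) <= radius or abs(x_center - x2) <= radius)):
--         return True
--
--     return False
-- ===== SOURCE B (Python) =====
-- def _axis_dist(c, lo, hi):
--     # distance from coordinate c to the nearest point of the axis-interval [lo, hi]
--     if lo <= c <= hi:
--         return 0
--     return min(abs(c - lo), abs(c - hi))
--
-- def checkOverlap(radius: int, x_center: int, y_center: int, x1: int, y1: int, x2: int, y2: int) -> bool:
--     # nearest-point method: compute the distance from the circle center to the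
--     # nearest point of the rectangle (per axis), then one comparison decides
--     dx = _axis_dist(x_center, x1, x2)
--     dy = _axis_dist(y_center, y1, y2)
--     return dx * dx + dy * dy <= radius * radius
-- ===== Notes on version B (the rewrite author's own statement) =====
-- stated objective: simpler
-- what changed: Replaced A's case enumeration (center-in-rectangle test, nested loop over the four corners, two explicit edge-distance tests) by the nearest-point method: compute the per-axis distance from the circle center to the rectangle (0 if the coordinate lies between the bounds, else the distance to the closer bound) and decide with a single squared-distance comparison; …
-- outside the precondition, e.g. on checkOverlap(-3, 6, 2, 9, -1, 9, 3): A returns False, B returns True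
import Mathlib
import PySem

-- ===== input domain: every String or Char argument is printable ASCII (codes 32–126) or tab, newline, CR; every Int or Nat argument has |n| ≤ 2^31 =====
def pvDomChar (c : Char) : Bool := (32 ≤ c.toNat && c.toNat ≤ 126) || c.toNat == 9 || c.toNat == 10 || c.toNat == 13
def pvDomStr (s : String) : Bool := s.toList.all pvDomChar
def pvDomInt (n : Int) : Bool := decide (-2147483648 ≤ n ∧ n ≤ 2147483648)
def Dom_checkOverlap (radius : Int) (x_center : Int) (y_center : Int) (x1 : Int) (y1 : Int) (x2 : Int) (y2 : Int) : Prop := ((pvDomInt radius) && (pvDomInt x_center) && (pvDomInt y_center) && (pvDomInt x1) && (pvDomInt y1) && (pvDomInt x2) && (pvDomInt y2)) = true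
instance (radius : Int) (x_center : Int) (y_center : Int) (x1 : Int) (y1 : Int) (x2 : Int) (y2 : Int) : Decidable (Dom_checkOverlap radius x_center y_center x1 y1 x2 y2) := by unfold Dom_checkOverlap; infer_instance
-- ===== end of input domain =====

-- B replaces A's case enumeration (center inside / four corners / two edge tests)
-- by the nearest-point method: per-axis distance to the rectangle, one comparison (simpler).

-- ===== PORT A =====
-- literal transliteration: branch 1 (center in rectangle), branch 2 (the four
-- corners, in the loop's order x1y1, x1y2, x2y1, x2y2), branch 3 (the two edge
-- tests), then False
def checkOverlap (radius : Int) (x_center : Int) (y_center : Int) (x1 : Int) (y1 : Int) (x2 : Int) (y2 : Int) : Bool :=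
  if x1 ≤ x_center ∧ x_center ≤ x2 ∧ y1 ≤ y_center ∧ y_center ≤ y2 then true
  else if (x1 - x_center) * (x1 - x_center) + (y1 - y_center) * (y1 - y_center) ≤ radius * radius then true
  else if (x1 - x_center) * (x1 - x_center) + (y2 - y_center) * (y2 - y_center) ≤ radius * radius then true
  else if (x2 - x_center) * (x2 - x_center) + (y1 - y_center) * (y1 - y_center) ≤ radius * radius then true
  else if (x2 - x_center) * (x2 - x_center) + (y2 - y_center) * (y2 - y_center) ≤ radius * radius then true
  else if (x1 ≤ x_center ∧ x_center ≤ x2) ∧ (|y_center - y1| ≤ radius ∨ |y_center - y2| ≤ radius) then true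
  else if (y1 ≤ y_center ∧ y_center ≤ y2) ∧ (|x_center - x1| ≤ radius ∨ |x_center - x2| ≤ radius) then true
  else false

-- ===== PORT B =====
-- distance from coordinate c to the nearest point of the axis-interval [lo, hi]
def axisDist (c : Int) (lo : Int) (hi : Int) : Int :=
  if lo ≤ c ∧ c ≤ hi then 0 else min |c - lo| |c - hi|

def checkOverlap_alt (radius : Int) (x_center : Int) (y_center : Int) (x1 : Int) (y1 : Int) (x2 : Int) (y2 : Int) : Bool :=
  let dx := axisDist x_center x1 x2
  let dy := axisDist y_center y1 y2
  decide (dx * dx + dy * dy ≤ radius * radius)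

-- ===== PRECONDITION & SPEC =====
-- Pre_ excludes the inputs with a negative radius (no circle of negative radius
-- exists, so no behaviour is specified) on which the center lies inside exactly
-- one of the two axis bands: only there A's squared corner comparison and its
-- linear edge comparison can disagree with a plain distance test, and both
-- answers are equally defensible.
def Pre_checkOverlap (radius : Int) (x_center : Int) (y_center : Int) (x1 : Int) (y1 : Int) (x2 : Int) (y2 : Int) : Prop :=
  0 ≤ radius ∨ ((x1 ≤ x_center ∧ x_center ≤ x2) ↔ (y1 ≤ y_center ∧ y_center ≤ y2))
instance (radius : Int) (x_center : Int) (y_center : Int) (x1 : Int) (y1 : Int) (x2 : Int) (y2 : Int) : Decidable (Pre_checkOverlap radius x_center y_center x1 y1 x2 y2) := by unfold Pre_checkOverlap; infer_instance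

def pvWitness_checkOverlap : Int × Int × Int × Int × Int × Int × Int := (2, 0, 0, 1, -1, 3, 1)

def Spec_checkOverlap (radius : Int) (x_center : Int) (y_center : Int) (x1 : Int) (y1 : Int) (x2 : Int) (y2 : Int) (out : Bool) : Prop := out = checkOverlap_alt radius x_center y_center x1 y1 x2 y2
instance (radius : Int) (x_center : Int) (y_center : Int) (x1 : Int) (y1 : Int) (x2 : Int) (y2 : Int) (out : Bool) : Decidable (Spec_checkOverlap radius x_center y_center x1 y1 x2 y2 out) := by unfold Spec_checkOverlap; infer_instance

-- ===== CLAIM (what is proved, stated in full; the proofs are below) =====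
def Claim_equal_checkOverlap : Prop := ∀ (radius : Int) (x_center : Int) (y_center : Int) (x1 : Int) (y1 : Int) (x2 : Int) (y2 : Int), Dom_checkOverlap radius x_center y_center x1 y1 x2 y2 → Pre_checkOverlap radius x_center y_center x1 y1 x2 y2 → Spec_checkOverlap radius x_center y_center x1 y1 x2 y2 (checkOverlap radius x_center y_center x1 y1 x2 y2)

-- ===== LEMMAS AND PROOFS =====

-- A's if-chain is the decide of the disjunction of its conditions
theorem A_eq (r xc yc x1 y1 x2 y2 : Int) :
    checkOverlap r xc yc x1 y1 x2 y2 =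
      decide ((x1 ≤ xc ∧ xc ≤ x2 ∧ y1 ≤ yc ∧ yc ≤ y2) ∨
        (x1 - xc) * (x1 - xc) + (y1 - yc) * (y1 - yc) ≤ r * r ∨
        (x1 - xc) * (x1 - xc) + (y2 - yc) * (y2 - yc) ≤ r * r ∨
        (x2 - xc) * (x2 - xc) + (y1 - yc) * (y1 - yc) ≤ r * r ∨
        (x2 - xc) * (x2 - xc) + (y2 - yc) * (y2 - yc) ≤ r * r ∨
        ((x1 ≤ xc ∧ xc ≤ x2) ∧ (|yc - y1| ≤ r ∨ |yc - y2| ≤ r)) ∨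
        ((y1 ≤ yc ∧ yc ≤ y2) ∧ (|xc - x1| ≤ r ∨ |xc - x2| ≤ r))) := by
  unfold checkOverlap
  split_ifs with h1 h2 h3 h4 h5 h6 h7 <;> simp_all

-- |a| ≤ |b| implies a*a ≤ b*b
theorem sq_le_sq_of_abs_le {a b : Int} (h : |a| ≤ |b|) : a * a ≤ b * b := by
  have := mul_self_le_mul_self (abs_nonneg a) h
  rwa [abs_mul_abs_self, abs_mul_abs_self] at this

-- |a| ≤ b implies a*a ≤ b*b
theorem sq_le_of_abs_le {a b : Int} (h : |a| ≤ b) : a * a ≤ b * b := by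
  have := mul_self_le_mul_self (abs_nonneg a) h
  rwa [abs_mul_abs_self] at this

-- a*a ≤ b*b with 0 ≤ b implies |a| ≤ b
theorem abs_le_of_sq_le {a b : Int} (hb : 0 ≤ b) (h : a * a ≤ b * b) : |a| ≤ b := by
  nlinarith [abs_nonneg a, abs_mul_abs_self a]

theorem key_checkOverlap (r xc yc x1 y1 x2 y2 : Int)
    (hr : 0 ≤ r ∨ ((x1 ≤ xc ∧ xc ≤ x2) ↔ (y1 ≤ yc ∧ yc ≤ y2))) :
    checkOverlap r xc yc x1 y1 x2 y2 = checkOverlap_alt r xc yc x1 y1 x2 y2 := by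
  rw [Bool.eq_iff_iff, A_eq]
  simp only [checkOverlap_alt, axisDist, decide_eq_true_eq]
  by_cases hx : x1 ≤ xc ∧ xc ≤ x2 <;> by_cases hy : y1 ≤ yc ∧ yc ≤ y2
  · -- center inside the rectangle
    rw [if_pos hx, if_pos hy]
    constructor
    · intro _; nlinarith [mul_self_nonneg r]
    · intro _; exact Or.inl ⟨hx.1, hx.2, hy.1, hy.2⟩
  · -- x inside, y outside: nearest point (xc, nearer y-bound)
    have hr0 : 0 ≤ r := hr.resolve_right (fun hiff => hy (hiff.mp hx))
    rw [if_pos hx, if_neg hy]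
    rcases le_total |yc - y1| |yc - y2| with hm | hm
    · rw [min_eq_left hm, abs_mul_abs_self]
      have hm2 : (yc - y1) * (yc - y1) ≤ (yc - y2) * (yc - y2) := sq_le_sq_of_abs_le hm
      constructor
      · rintro (⟨_, _, c, d⟩ | h | h | h | h | ⟨_, h | h⟩ | ⟨⟨c, d⟩, _⟩)
        · exact absurd ⟨c, d⟩ hy
        · linarith [mul_self_nonneg (x1 - xc)]
        · linarith [mul_self_nonneg (x1 - xc), hm2]
        · linarith [mul_self_nonneg (x2 - xc)]
        · linarith [mul_self_nonneg (x2 - xc), hm2]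
        · linarith [sq_le_of_abs_le h]
        · linarith [sq_le_of_abs_le h, hm2]
        · exact absurd ⟨c, d⟩ hy
      · intro h
        refine Or.inr (Or.inr (Or.inr (Or.inr (Or.inr (Or.inl ⟨hx, Or.inl ?_⟩)))))
        exact abs_le_of_sq_le hr0 (by linarith)
    · rw [min_eq_right hm, abs_mul_abs_self]
      have hm2 : (yc - y2) * (yc - y2) ≤ (yc - y1) * (yc - y1) := sq_le_sq_of_abs_le hm
      constructor
      · rintro (⟨_, _, c, d⟩ | h | h | h | h | ⟨_, h | h⟩ | ⟨⟨c, d⟩, _⟩)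
        · exact absurd ⟨c, d⟩ hy
        · linarith [mul_self_nonneg (x1 - xc), hm2]
        · linarith [mul_self_nonneg (x1 - xc)]
        · linarith [mul_self_nonneg (x2 - xc), hm2]
        · linarith [mul_self_nonneg (x2 - xc)]
        · linarith [sq_le_of_abs_le h, hm2]
        · linarith [sq_le_of_abs_le h]
        · exact absurd ⟨c, d⟩ hy
      · intro h
        refine Or.inr (Or.inr (Or.inr (Or.inr (Or.inr (Or.inl ⟨hx, Or.inr ?_⟩)))))
        exact abs_le_of_sq_le hr0 (by linarith)
  · -- y inside, x outside: nearest point (nearer x-bound, yc)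
    have hr0 : 0 ≤ r := hr.resolve_right (fun hiff => hx (hiff.mpr hy))
    rw [if_neg hx, if_pos hy]
    rcases le_total |xc - x1| |xc - x2| with hm | hm
    · rw [min_eq_left hm, abs_mul_abs_self]
      have hm2 : (xc - x1) * (xc - x1) ≤ (xc - x2) * (xc - x2) := sq_le_sq_of_abs_le hm
      constructor
      · rintro (⟨a, b, _, _⟩ | h | h | h | h | ⟨⟨a, b⟩, _⟩ | ⟨_, h | h⟩)
        · exact absurd ⟨a, b⟩ hx
        · linarith [mul_self_nonneg (y1 - yc)]
        · linarith [mul_self_nonneg (y2 - yc)]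
        · linarith [mul_self_nonneg (y1 - yc), hm2]
        · linarith [mul_self_nonneg (y2 - yc), hm2]
        · exact absurd ⟨a, b⟩ hx
        · linarith [sq_le_of_abs_le h]
        · linarith [sq_le_of_abs_le h, hm2]
      · intro h
        refine Or.inr (Or.inr (Or.inr (Or.inr (Or.inr (Or.inr ⟨hy, Or.inl ?_⟩)))))
        exact abs_le_of_sq_le hr0 (by linarith)
    · rw [min_eq_right hm, abs_mul_abs_self]
      have hm2 : (xc - x2) * (xc - x2) ≤ (xc - x1) * (xc - x1) := sq_le_sq_of_abs_le hm
      constructor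
      · rintro (⟨a, b, _, _⟩ | h | h | h | h | ⟨⟨a, b⟩, _⟩ | ⟨_, h | h⟩)
        · exact absurd ⟨a, b⟩ hx
        · linarith [mul_self_nonneg (y1 - yc), hm2]
        · linarith [mul_self_nonneg (y2 - yc), hm2]
        · linarith [mul_self_nonneg (y1 - yc)]
        · linarith [mul_self_nonneg (y2 - yc)]
        · exact absurd ⟨a, b⟩ hx
        · linarith [sq_le_of_abs_le h, hm2]
        · linarith [sq_le_of_abs_le h]
      · intro h
        refine Or.inr (Or.inr (Or.inr (Or.inr (Or.inr (Or.inr ⟨hy, Or.inr ?_⟩)))))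
        exact abs_le_of_sq_le hr0 (by linarith)
  · -- both outside: nearest point is the nearer corner
    rw [if_neg hx, if_neg hy]
    rcases le_total |xc - x1| |xc - x2| with hmx | hmx <;>
      rcases le_total |yc - y1| |yc - y2| with hmy | hmy
    · rw [min_eq_left hmx, min_eq_left hmy, abs_mul_abs_self, abs_mul_abs_self]
      have hm2x : (xc - x1) * (xc - x1) ≤ (xc - x2) * (xc - x2) := sq_le_sq_of_abs_le hmx
      have hm2y : (yc - y1) * (yc - y1) ≤ (yc - y2) * (yc - y2) := sq_le_sq_of_abs_le hmy
      constructor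
      · rintro (⟨a, b, c, d⟩ | h | h | h | h | ⟨⟨a, b⟩, _⟩ | ⟨⟨c, d⟩, _⟩)
        · exact absurd ⟨a, b⟩ hx
        · linarith
        · linarith [hm2y]
        · linarith [hm2x]
        · linarith [hm2x, hm2y]
        · exact absurd ⟨a, b⟩ hx
        · exact absurd ⟨c, d⟩ hy
      · intro h; exact Or.inr (Or.inl (by linarith))
    · rw [min_eq_left hmx, min_eq_right hmy, abs_mul_abs_self, abs_mul_abs_self]
      have hm2x : (xc - x1) * (xc - x1) ≤ (xc - x2) * (xc - x2) := sq_le_sq_of_abs_le hmx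
      have hm2y : (yc - y2) * (yc - y2) ≤ (yc - y1) * (yc - y1) := sq_le_sq_of_abs_le hmy
      constructor
      · rintro (⟨a, b, c, d⟩ | h | h | h | h | ⟨⟨a, b⟩, _⟩ | ⟨⟨c, d⟩, _⟩)
        · exact absurd ⟨a, b⟩ hx
        · linarith [hm2y]
        · linarith
        · linarith [hm2x, hm2y]
        · linarith [hm2x]
        · exact absurd ⟨a, b⟩ hx
        · exact absurd ⟨c, d⟩ hy
      · intro h; exact Or.inr (Or.inr (Or.inl (by linarith)))
    · rw [min_eq_right hmx, min_eq_left hmy, abs_mul_abs_self, abs_mul_abs_self]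
      have hm2x : (xc - x2) * (xc - x2) ≤ (xc - x1) * (xc - x1) := sq_le_sq_of_abs_le hmx
      have hm2y : (yc - y1) * (yc - y1) ≤ (yc - y2) * (yc - y2) := sq_le_sq_of_abs_le hmy
      constructor
      · rintro (⟨a, b, c, d⟩ | h | h | h | h | ⟨⟨a, b⟩, _⟩ | ⟨⟨c, d⟩, _⟩)
        · exact absurd ⟨a, b⟩ hx
        · linarith [hm2x]
        · linarith [hm2x, hm2y]
        · linarith
        · linarith [hm2y]
        · exact absurd ⟨a, b⟩ hx
        · exact absurd ⟨c, d⟩ hy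
      · intro h; exact Or.inr (Or.inr (Or.inr (Or.inl (by linarith))))
    · rw [min_eq_right hmx, min_eq_right hmy, abs_mul_abs_self, abs_mul_abs_self]
      have hm2x : (xc - x2) * (xc - x2) ≤ (xc - x1) * (xc - x1) := sq_le_sq_of_abs_le hmx
      have hm2y : (yc - y2) * (yc - y2) ≤ (yc - y1) * (yc - y1) := sq_le_sq_of_abs_le hmy
      constructor
      · rintro (⟨a, b, c, d⟩ | h | h | h | h | ⟨⟨a, b⟩, _⟩ | ⟨⟨c, d⟩, _⟩)
        · exact absurd ⟨a, b⟩ hx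
        · linarith [hm2x, hm2y]
        · linarith [hm2x]
        · linarith [hm2y]
        · linarith
        · exact absurd ⟨a, b⟩ hx
        · exact absurd ⟨c, d⟩ hy
      · intro h; exact Or.inr (Or.inr (Or.inr (Or.inr (Or.inl (by linarith)))))

-- ===== VERDICT (by name: the statement is the Claim_ definition above) =====
theorem checkOverlap_spec : Claim_equal_checkOverlap := by
  intro radius x_center y_center x1 y1 x2 y2 _ hpre
  unfold Spec_checkOverlap
  exact key_checkOverlap radius x_center y_center x1 y1 x2 y2 hpre
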